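-- pv_equiv track=rewrite | github.com/brit05h/CSCI-133 | test5.py | cleanedup
-- ===== SOURCE A (Python) =====
-- def cleanedup(s):
--     alphabet = 'abcdefghijklmnopqrstuvwxyz0123456789@_'
--     cleantext = ''
--     for character in s.lower():
--         if character in alphabet:
--             cleantext += character
--         else:
--             cleantext += ' '
--     return cleantext
-- ===== SOURCE B (Python) =====
-- import re
--
-- def cleanedup(s):
--     return re.sub(r'[^a-z0-9@_]', ' ', s.lower())
-- ===== Notes on version B (the rewrite author's own statement) =====
-- stated objective: idiomatic
-- what changed: Replaces the explicit per-character accumulation loop with its 38-char alphabet membership scan by a single regex substitution (character-class complement [^a-z0-9@_] -> ' ') on the lowercased input.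
import Mathlib
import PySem

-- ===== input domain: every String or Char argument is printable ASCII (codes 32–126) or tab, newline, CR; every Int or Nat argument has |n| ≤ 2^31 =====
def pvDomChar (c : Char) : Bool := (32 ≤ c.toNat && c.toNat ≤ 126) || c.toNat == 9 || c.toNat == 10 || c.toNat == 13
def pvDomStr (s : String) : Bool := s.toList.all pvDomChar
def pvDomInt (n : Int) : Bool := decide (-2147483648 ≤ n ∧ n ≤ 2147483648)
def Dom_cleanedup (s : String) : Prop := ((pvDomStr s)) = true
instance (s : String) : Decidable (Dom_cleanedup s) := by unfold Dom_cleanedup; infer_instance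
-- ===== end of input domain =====

-- B replaces A's per-character accumulation loop (with its 38-char alphabet membership scan)
-- by a single regex substitution ([^a-z0-9@_] -> ' ') on the lowercased input; objective: idiomatic.

-- ===== PORT A =====
def cleanedup (s : String) : String :=
  let alphabet := "abcdefghijklmnopqrstuvwxyz0123456789@_"
  (PySem.Str.lower s).toList.foldl
    (fun cleantext character =>
      if alphabet.toList.contains character then cleantext ++ String.ofList [character]
      else cleantext ++ String.ofList [' ']) ""

-- ===== PORT B =====
-- re.sub(r'[^a-z0-9@_]', ' ', t) on a single-codepoint class complement is exact:
-- every character of t matching the class is kept, every other character becomes ' '.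
def pvMatchClass (c : Char) : Bool :=
  ('a' ≤ c && c ≤ 'z') || ('0' ≤ c && c ≤ '9') || c == '@' || c == '_'

def cleanedup_alt (s : String) : String :=
  String.ofList ((PySem.Str.lower s).toList.map (fun c => if pvMatchClass c then c else ' '))

-- ===== PRECONDITION & SPEC =====
def Spec_cleanedup (s : String) (out : String) : Prop := out = cleanedup_alt s
instance (s : String) (out : String) : Decidable (Spec_cleanedup s out) := by unfold Spec_cleanedup; infer_instance

-- ===== CLAIM (what is proved, stated in full; the proofs are below) =====
def Claim_equal_cleanedup : Prop := ∀ (s : String), Dom_cleanedup s → Spec_cleanedup s (cleanedup s)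

-- ===== LEMMAS AND PROOFS =====

lemma alpha_iff (c : Char) :
    ("abcdefghijklmnopqrstuvwxyz0123456789@_".toList.contains c = true) ↔ pvMatchClass c = true := by
  have hv : ∀ d : Char, c = d ↔ c.val.toNat = d.val.toNat := by
    intro d
    constructor
    · intro h; rw [h]
    · intro h; exact Char.ext (UInt32.toNat_inj.mp h)
  have hl : "abcdefghijklmnopqrstuvwxyz0123456789@_".toList =
      ['a','b','c','d','e','f','g','h','i','j','k','l','m','n','o','p','q','r','s','t','u','v','w','x','y','z','0','1','2','3','4','5','6','7','8','9','@','_'] := rfl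
  have h48 : ('0'.val.toNat) = 48 := rfl
  have h49 : ('1'.val.toNat) = 49 := rfl
  have h50 : ('2'.val.toNat) = 50 := rfl
  have h51 : ('3'.val.toNat) = 51 := rfl
  have h52 : ('4'.val.toNat) = 52 := rfl
  have h53 : ('5'.val.toNat) = 53 := rfl
  have h54 : ('6'.val.toNat) = 54 := rfl
  have h55 : ('7'.val.toNat) = 55 := rfl
  have h56 : ('8'.val.toNat) = 56 := rfl
  have h57 : ('9'.val.toNat) = 57 := rfl
  have h64 : ('@'.val.toNat) = 64 := rfl
  have h95 : ('_'.val.toNat) = 95 := rfl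
  have h97 : ('a'.val.toNat) = 97 := rfl
  have h98 : ('b'.val.toNat) = 98 := rfl
  have h99 : ('c'.val.toNat) = 99 := rfl
  have h100 : ('d'.val.toNat) = 100 := rfl
  have h101 : ('e'.val.toNat) = 101 := rfl
  have h102 : ('f'.val.toNat) = 102 := rfl
  have h103 : ('g'.val.toNat) = 103 := rfl
  have h104 : ('h'.val.toNat) = 104 := rfl
  have h105 : ('i'.val.toNat) = 105 := rfl
  have h106 : ('j'.val.toNat) = 106 := rfl
  have h107 : ('k'.val.toNat) = 107 := rfl
  have h108 : ('l'.val.toNat) = 108 := rfl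
  have h109 : ('m'.val.toNat) = 109 := rfl
  have h110 : ('n'.val.toNat) = 110 := rfl
  have h111 : ('o'.val.toNat) = 111 := rfl
  have h112 : ('p'.val.toNat) = 112 := rfl
  have h113 : ('q'.val.toNat) = 113 := rfl
  have h114 : ('r'.val.toNat) = 114 := rfl
  have h115 : ('s'.val.toNat) = 115 := rfl
  have h116 : ('t'.val.toNat) = 116 := rfl
  have h117 : ('u'.val.toNat) = 117 := rfl
  have h118 : ('v'.val.toNat) = 118 := rfl
  have h119 : ('w'.val.toNat) = 119 := rfl
  have h120 : ('x'.val.toNat) = 120 := rfl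
  have h121 : ('y'.val.toNat) = 121 := rfl
  have h122 : ('z'.val.toNat) = 122 := rfl
  rw [hl]
  simp only [pvMatchClass, List.contains_eq_mem, decide_eq_true_eq, List.mem_cons,
    List.not_mem_nil, or_false, Char.le_def, UInt32.le_iff_toNat_le, hv,
    Bool.or_eq_true, Bool.and_eq_true, decide_eq_true_eq, beq_iff_eq, h48, h49, h50, h51, h52, h53, h54, h55, h56, h57, h64, h95, h97, h98, h99, h100, h101, h102, h103, h104, h105, h106, h107, h108, h109, h110, h111, h112, h113, h114, h115, h116, h117, h118, h119, h120, h121, h122]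
  omega

lemma step_eq (c : Char) (acc : String) :
    (if "abcdefghijklmnopqrstuvwxyz0123456789@_".toList.contains c then acc ++ String.ofList [c]
     else acc ++ String.ofList [' ']) = acc ++ String.ofList [if pvMatchClass c then c else ' '] := by
  by_cases h : pvMatchClass c = true
  · rw [if_pos ((alpha_iff c).mpr h), if_pos h]
  · rw [if_neg (fun hc => h ((alpha_iff c).mp hc)), if_neg h]

lemma foldl_step (l : List Char) (acc : String) :
    l.foldl (fun cleantext character =>
      if "abcdefghijklmnopqrstuvwxyz0123456789@_".toList.contains character then
        cleantext ++ String.ofList [character]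
      else cleantext ++ String.ofList [' ']) acc
      = acc ++ String.ofList (l.map (fun c => if pvMatchClass c then c else ' ')) := by
  induction l generalizing acc with
  | nil =>
    apply String.ext
    simp
  | cons c rest ih =>
    rw [List.foldl_cons, step_eq, ih, List.map_cons]
    apply String.ext
    simp

-- ===== VERDICT (by name: the statement is the Claim_ definition above) =====
theorem cleanedup_spec : Claim_equal_cleanedup := by
  intro s _
  unfold Spec_cleanedup cleanedup cleanedup_alt
  rw [foldl_step]
  apply String.ext
  simp
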